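-- pv_equiv track=rewrite | github.com/lanhdev/interviewbit-challenges | Arrays/Hotel_Bookings_Possible/hotel_bookings_possible.py | hotel
-- ===== SOURCE A (Python) =====
-- def hotel(arrive, depart, K):
--   n = len(arrive)
--   guests = []
--   for i in range(n):
--     guests.append((arrive[i], 1))
--     guests.append((depart[i], -1))
--   guests.sort()
--   num_of_rooms = 0
--   for guest in guests:
--     num_of_rooms += guest[1]
--     if num_of_rooms > K:
--       return False
--   return True
-- ===== SOURCE B (Python) =====
-- def hotel(arrive, depart, K):
--   n = len(arrive)
--   arr = sorted(arrive)
--   dep = sorted(depart[:n])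
--   rooms = 0
--   i = j = 0
--   while i < n:
--     if j < n and dep[j] <= arr[i]:
--       rooms -= 1
--       j += 1
--     else:
--       rooms += 1
--       i += 1
--     if rooms > K:
--       return False
--   return True
-- ===== Notes on version B (the rewrite author's own statement) =====
-- stated objective: faster
-- what changed: Instead of building and sorting a combined list of 2n (time, delta) tuples and sweeping it, B sorts the arrival and departure times separately and runs a two-pointer merge sweep over the two sorted int lists, tracking the room count; strict tie order (departure frees a room before a coincident arrival) matches A's tuple sort.
import Mathlib
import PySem

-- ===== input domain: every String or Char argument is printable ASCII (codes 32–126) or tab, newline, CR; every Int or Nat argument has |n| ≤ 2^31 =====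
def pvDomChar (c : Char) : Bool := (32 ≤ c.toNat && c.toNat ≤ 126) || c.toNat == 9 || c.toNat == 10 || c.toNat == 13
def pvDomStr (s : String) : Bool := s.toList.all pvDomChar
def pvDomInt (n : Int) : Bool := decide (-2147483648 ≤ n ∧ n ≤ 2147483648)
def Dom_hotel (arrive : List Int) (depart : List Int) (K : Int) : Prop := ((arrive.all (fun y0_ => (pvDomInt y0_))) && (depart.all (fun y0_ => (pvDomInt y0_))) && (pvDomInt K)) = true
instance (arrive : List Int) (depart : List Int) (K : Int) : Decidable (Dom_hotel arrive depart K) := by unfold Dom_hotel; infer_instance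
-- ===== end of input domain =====

-- B replaces A's sort of a combined 2n-tuple event list by a two-pointer merge sweep over the
-- separately sorted arrival and departure lists (constant-factor cheaper; same O(n log n)).


-- ===== PORT A =====
-- 'for i in range(n): guests.append((arrive[i], 1)); guests.append((depart[i], -1))'
def hotelEvents (arrive : List Int) (depart : List Int) : List (Int × Int) :=
  (PySem.List.pyRange 0 (arrive.length : Int) 1).foldl
    (fun g i => g ++ [(PySem.List.pyGetD arrive i 0, (1 : Int)), (PySem.List.pyGetD depart i 0, (-1 : Int))]) []

-- 'for guest in guests: num_of_rooms += guest[1]; if num_of_rooms > K: return False' then 'return True'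
def hotelSweep : List (Int × Int) → Int → Int → Bool
  | [], _, _ => true
  | g :: rest, rooms, K =>
    let r := rooms + g.2
    if r > K then false else hotelSweep rest r K

-- guests.sort(): Python's default tuple comparison is lexicographic; ported as sorted with the
-- lexicographic key 'toLex' on Int × Int (exact for tuple sort)
def hotel (arrive : List Int) (depart : List Int) (K : Int) : Bool :=
  hotelSweep (PySem.List.sorted (hotelEvents arrive depart) (fun p => toLex p) false) 0 K

-- ===== PORT B =====
-- the 'while i < n' two-pointer loop of Source B, as the obvious structural recursion on the two
-- sorted lists (i/j pointers become the remaining suffixes); same rooms/K state, same checks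
def mergeSweep : List Int → List Int → Int → Int → Bool
  | [], _, _, _ => true
  | a :: ta, d :: td, rooms, K =>
    if d ≤ a then
      (if rooms - 1 > K then false else mergeSweep (a :: ta) td (rooms - 1) K)
    else
      (if rooms + 1 > K then false else mergeSweep ta (d :: td) (rooms + 1) K)
  | _ :: ta, [], rooms, K =>
    if rooms + 1 > K then false else mergeSweep ta [] (rooms + 1) K
termination_by sa sd _ _ => sa.length + sd.length

def hotel_alt (arrive : List Int) (depart : List Int) (K : Int) : Bool :=
  mergeSweep (PySem.List.sorted arrive (fun x => x) false)
    (PySem.List.sorted (PySem.List.slice depart none (some (arrive.length : Int))) (fun x => x) false)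
    0 K

-- ===== PRECONDITION & SPEC =====
-- A raises IndexError (depart[i]) when depart is shorter than arrive; excluded, nothing more.
def Pre_hotel (arrive : List Int) (depart : List Int) (K : Int) : Prop :=
  arrive.length ≤ depart.length
instance (arrive : List Int) (depart : List Int) (K : Int) : Decidable (Pre_hotel arrive depart K) := by
  unfold Pre_hotel; infer_instance
def pvWitness_hotel : List Int × List Int × Int := ([1, 3], [2, 4], 1)

def Spec_hotel (arrive : List Int) (depart : List Int) (K : Int) (out : Bool) : Prop := out = hotel_alt arrive depart K
instance (arrive : List Int) (depart : List Int) (K : Int) (out : Bool) : Decidable (Spec_hotel arrive depart K out) := by unfold Spec_hotel; infer_instance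

-- ===== CLAIM (what is proved, stated in full; the proofs are below) =====
def Claim_equal_hotel : Prop := ∀ (arrive : List Int) (depart : List Int) (K : Int), Dom_hotel arrive depart K → Pre_hotel arrive depart K → Spec_hotel arrive depart K (hotel arrive depart K)

-- ===== LEMMAS AND PROOFS =====

-- the merged event sequence B implicitly traverses

def mergeEv : List Int → List Int → List (Int × Int)
  | [], sd => sd.map (fun d => (d, -1))
  | a :: ta, [] => (a :: ta).map (fun a => (a, 1))
  | a :: ta, d :: td =>
    if d ≤ a then (d, -1) :: mergeEv (a :: ta) td
    else (a, 1) :: mergeEv ta (d :: td)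
termination_by sa sd => sa.length + sd.length

theorem mergeEv_perm (sa sd : List Int) :
    (mergeEv sa sd).Perm (sa.map (fun a => (a, 1)) ++ sd.map (fun d => (d, -1))) := by
  induction sa, sd using mergeEv.induct with
  | case1 sd => simp [mergeEv]
  | case2 a ta => simp [mergeEv]
  | case3 a ta d td h ih =>
    rw [mergeEv, if_pos h]
    exact (ih.cons _).trans List.perm_middle.symm
  | case4 a ta d td h ih =>
    rw [mergeEv, if_neg h]
    exact ih.cons _

theorem mem_mergeEv {y : Int × Int} {sa sd : List Int} (hy : y ∈ mergeEv sa sd) :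
    (∃ x ∈ sa, y = (x, 1)) ∨ (∃ x ∈ sd, y = (x, -1)) := by
  have := (mergeEv_perm sa sd).mem_iff.mp hy
  simp only [List.mem_append, List.mem_map] at this
  rcases this with ⟨x, hx, rfl⟩ | ⟨x, hx, rfl⟩
  · exact Or.inl ⟨x, hx, rfl⟩
  · exact Or.inr ⟨x, hx, rfl⟩

theorem mergeEv_pairwise (sa sd : List Int)
    (hsa : sa.Pairwise (· ≤ ·)) (hsd : sd.Pairwise (· ≤ ·)) :
    (mergeEv sa sd).Pairwise (fun p q => toLex p ≤ toLex q) := by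
  induction sa, sd using mergeEv.induct with
  | case1 sd =>
    rw [mergeEv, List.pairwise_map]
    exact hsd.imp (fun {a b} hab => by rw [Prod.Lex.toLex_le_toLex]; simp; omega)
  | case2 a ta =>
    rw [mergeEv, List.pairwise_map]
    exact hsa.imp (fun {a b} hab => by rw [Prod.Lex.toLex_le_toLex]; simp; omega)
  | case3 a ta d td h ih =>
    rw [mergeEv, if_pos h, List.pairwise_cons]
    refine ⟨?_, ih hsa (List.Pairwise.of_cons hsd)⟩
    intro y hy
    rcases mem_mergeEv hy with ⟨x, hx, rfl⟩ | ⟨x, hx, rfl⟩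
    · have hax : a ≤ x ∨ a = x := by
        rcases List.mem_cons.mp hx with rfl | hx
        · exact Or.inr rfl
        · exact Or.inl ((List.pairwise_cons.mp hsa).1 x hx)
      rw [Prod.Lex.toLex_le_toLex]; simp; omega
    · have : d ≤ x := (List.pairwise_cons.mp hsd).1 x hx
      rw [Prod.Lex.toLex_le_toLex]; simp; omega
  | case4 a ta d td h ih =>
    rw [mergeEv, if_neg h, List.pairwise_cons]
    refine ⟨?_, ih (List.Pairwise.of_cons hsa) hsd⟩
    intro y hy
    rcases mem_mergeEv hy with ⟨x, hx, rfl⟩ | ⟨x, hx, rfl⟩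
    · have : a ≤ x := (List.pairwise_cons.mp hsa).1 x hx
      rw [Prod.Lex.toLex_le_toLex]; simp; omega
    · have hdx : d ≤ x ∨ d = x := by
        rcases List.mem_cons.mp hx with rfl | hx
        · exact Or.inr rfl
        · exact Or.inl ((List.pairwise_cons.mp hsd).1 x hx)
      rw [Prod.Lex.toLex_le_toLex]; simp; omega

theorem flatMap_pair_perm (zs : List (Int × Int)) :
    (zs.flatMap (fun p => [(p.1, (1:Int)), (p.2, (-1:Int))])).Perm
      (zs.map (fun p => (p.1, 1)) ++ zs.map (fun p => (p.2, -1))) := by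
  induction zs with
  | nil => simp
  | cons p t ih =>
    simp only [List.flatMap_cons, List.map_cons, List.cons_append]
    exact (((ih.cons _).cons _).trans (List.perm_middle.symm.cons _))

theorem hotelEvents_perm (arrive depart : List Int) (h : arrive.length ≤ depart.length) :
    (hotelEvents arrive depart).Perm
      (arrive.map (fun a => (a, 1)) ++ (depart.take arrive.length).map (fun d => (d, -1))) := by
  have hlen : (depart.take arrive.length).length = arrive.length := by
    simp [List.length_take]; omega
  have hmap : (PySem.List.pyRange 0 (arrive.length : Int) 1).map
      (fun i => (PySem.List.pyGetD arrive i 0, PySem.List.pyGetD depart i 0))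
      = arrive.zip (depart.take arrive.length) := by
    apply List.ext_getElem
    · simp [PySem.List.length_pyRange_one, hlen]
    · intro k h1 h2
      have hk : k < arrive.length := by
        simpa [PySem.List.length_pyRange_one] using h1
      simp [PySem.List.getElem_pyRange_one, List.getElem_zip, List.getElem_take,
        PySem.List.pyGetD_natCast, List.getD_eq_getElem?_getD,
        hk, Nat.lt_of_lt_of_le hk h]
  have hev : hotelEvents arrive depart
      = (arrive.zip (depart.take arrive.length)).flatMap (fun p => [(p.1, (1:Int)), (p.2, (-1:Int))]) := by
    unfold hotelEvents
    rw [PySem.List.foldl_append_eq_flatMap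
      (fun i => [(PySem.List.pyGetD arrive i 0, (1 : Int)), (PySem.List.pyGetD depart i 0, (-1 : Int))])]
    rw [List.nil_append, ← hmap, List.flatMap_map]
  rw [hev]
  refine (flatMap_pair_perm _).trans ?_
  have hfst : List.map Prod.fst (arrive.zip (depart.take arrive.length)) = arrive :=
    List.map_fst_zip (by omega)
  have hsnd : List.map Prod.snd (arrive.zip (depart.take arrive.length)) = depart.take arrive.length :=
    List.map_snd_zip (by omega)
  rw [show (fun p : Int × Int => (p.1, (1:Int))) = ((fun a => (a, (1:Int))) ∘ Prod.fst) from rfl,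
      show (fun p : Int × Int => (p.2, (-1:Int))) = ((fun d => (d, (-1:Int))) ∘ Prod.snd) from rfl,
      ← List.map_map, ← List.map_map, hfst, hsnd]

theorem sweepDeps (sd : List Int) (r K : Int) (h : r ≤ K) :
    hotelSweep (sd.map (fun d => (d, -1))) r K = true := by
  induction sd generalizing r with
  | nil => rfl
  | cons d td ih =>
    rw [List.map_cons, hotelSweep]
    simp only []
    rw [if_neg (by omega)]
    exact ih (r + -1) (by omega)

theorem sweep_mergeEv (sa sd : List Int) (r K : Int) :
    (sa = [] → sd = [] ∨ r ≤ K) →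
    hotelSweep (mergeEv sa sd) r K = mergeSweep sa sd r K := by
  induction sa, sd, r, K using mergeSweep.induct with
  | case1 sd r K =>
    intro h
    rcases h rfl with rfl | hle
    · simp [mergeEv, mergeSweep, hotelSweep]
    · rw [mergeEv, mergeSweep, sweepDeps sd r K hle]
  | case2 a ta d td r K hda hK =>
    intro _
    rw [mergeEv, if_pos hda, mergeSweep, if_pos hda, hotelSweep]
    simp only []
    rw [if_pos (by omega), if_pos hK]
  | case3 a ta d td r K hda hK ih =>
    intro _
    rw [mergeEv, if_pos hda, mergeSweep, if_pos hda, hotelSweep]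
    simp only []
    rw [if_neg (by omega), if_neg hK, show r + -1 = r - 1 from by ring]
    exact ih (by simp)
  | case4 a ta d td r K hda hK =>
    intro _
    rw [mergeEv, if_neg hda, mergeSweep, if_neg hda, hotelSweep]
    simp only []
    rw [if_pos (by omega), if_pos hK]
  | case5 a ta d td r K hda hK ih =>
    intro _
    rw [mergeEv, if_neg hda, mergeSweep, if_neg hda, hotelSweep]
    simp only []
    rw [if_neg (by omega), if_neg hK]
    exact ih (fun _ => Or.inr (by omega))
  | case6 a ta r K hK =>
    intro _
    rw [mergeEv, mergeSweep, List.map_cons, hotelSweep]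
    simp only []
    rw [if_pos (by omega), if_pos hK]
  | case7 a ta r K hK ih =>
    intro _
    rw [mergeEv, mergeSweep, List.map_cons, hotelSweep]
    simp only []
    rw [if_neg (by omega), if_neg hK]
    have hme : mergeEv ta [] = ta.map (fun a => (a, 1)) := by
      cases ta <;> simp [mergeEv]
    rw [← ih (fun _ => Or.inr (by omega)), hme]

-- ===== VERDICT (by name: the statement is the Claim_ definition above) =====
theorem hotel_spec : Claim_equal_hotel := by
  intro arrive depart K _hdom hpre
  unfold Spec_hotel hotel hotel_alt
  have hslice : PySem.List.slice depart none (some (arrive.length : Int)) = depart.take arrive.length :=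
    PySem.List.slice_to_natCast depart arrive.length
  rw [hslice]
  set sa := PySem.List.sorted arrive (fun x => x) false with hsa
  set sd := PySem.List.sorted (depart.take arrive.length) (fun x => x) false with hsd
  have hsorted : PySem.List.sorted (hotelEvents arrive depart) (fun p => toLex p) false = mergeEv sa sd := by
    apply PySem.List.eq_of_perm_of_pairwise_le_of_injective (fun p : Int × Int => toLex p) (fun _ _ h => h)
    · exact ((PySem.List.sorted_perm _ _ _).trans (hotelEvents_perm arrive depart hpre)).trans
        (((PySem.List.sorted_perm arrive (fun x => x) false).map _).append
          ((PySem.List.sorted_perm (depart.take arrive.length) (fun x => x) false).map _)).symm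
          |>.trans (mergeEv_perm sa sd).symm
    · exact PySem.List.sorted_pairwise _ _
    · exact mergeEv_pairwise sa sd (PySem.List.sorted_pairwise arrive (fun x => x))
        (PySem.List.sorted_pairwise (depart.take arrive.length) (fun x => x))
  rw [hsorted]
  apply sweep_mergeEv
  intro hnil
  left
  have : arrive = [] := (PySem.List.sorted_eq_nil_iff _ _ _).mp hnil
  simp [hsd, this, PySem.List.sorted_eq_nil_iff]
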